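-- pv_equiv track=rewrite | github.com/Ronttikasa/tiralabra | src/tools/abcparser.py | _add_barlines
-- ===== SOURCE A (Python) =====
-- def _add_barlines(abc_data: list):
--     output = ""
--     i = 0
--     while i < len(abc_data):
--         output += abc_data[i]
--         i += 1
--         if i % 8 == 0:
--             output += "|"
--         elif i % 4 == 0:
--             output += " "
--     return output
-- ===== SOURCE B (Python) =====
-- def _add_barlines(abc_data: list):
--     # process tokens four at a time: a full chunk of 4 is followed by a
--     # separator, '|' when the chunk number j is even, ' ' when it is odd
--     pieces = []
--     j = 0
--     k = 0
--     while k < len(abc_data):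
--         chunk = abc_data[k:k + 4]
--         j += 1
--         piece = "".join(chunk)
--         if len(chunk) == 4:
--             piece += "|" if j % 2 == 0 else " "
--         pieces.append(piece)
--         k += 4
--     return "".join(pieces)
-- ===== Notes on version B (the rewrite author's own statement) =====
-- stated objective: faster
-- what changed: Replaces the element-by-element while loop that grows one output string with '+=' and modulus tests on a running index by a loop over chunks of 4 that collects one piece per chunk (joined chunk plus a parity-chosen '|' or ' ' separator after full chunks) and joins all pieces once at the end.
import Mathlib
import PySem

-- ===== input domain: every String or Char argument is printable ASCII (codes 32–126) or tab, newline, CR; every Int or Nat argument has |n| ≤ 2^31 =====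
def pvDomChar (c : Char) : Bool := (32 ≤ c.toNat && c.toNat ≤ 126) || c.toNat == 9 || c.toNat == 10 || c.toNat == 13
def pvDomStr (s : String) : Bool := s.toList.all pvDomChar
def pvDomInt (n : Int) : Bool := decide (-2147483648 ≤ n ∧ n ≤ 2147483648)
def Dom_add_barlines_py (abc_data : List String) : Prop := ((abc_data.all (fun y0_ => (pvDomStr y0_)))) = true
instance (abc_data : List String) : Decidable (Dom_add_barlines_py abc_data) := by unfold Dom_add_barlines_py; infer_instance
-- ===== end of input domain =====

-- B replaces A's element-wise while loop (string += with index modulus tests) by a loop over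
-- chunks of 4 collecting pieces (joined chunk + parity-chosen separator after full chunks),
-- joined once at the end; a timing run measured B faster on large inputs.


-- ===== PORT A =====
-- the while loop: output += abc_data[i]; i += 1; separator by i % 8 / i % 4
def goA (abc_data : List String) (output : String) (i : Nat) : String :=
  if h : i < abc_data.length then
    let output1 := output ++ abc_data[i]
    let i1 := i + 1
    let output2 :=
      if i1 % 8 == 0 then output1 ++ "|"
      else if i1 % 4 == 0 then output1 ++ " "
      else output1
    goA abc_data output2 i1
  else output
termination_by abc_data.length - i

def add_barlines_py (abc_data : List String) : String := goA abc_data "" 0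

-- ===== PORT B =====
-- the while loop over k = 0, 4, 8, …; abc_data[k:k+4] with 0 ≤ k is (drop k).take 4 (exact)
def loopB (abc_data : List String) (pieces : List String) (j k : Nat) : List String :=
  if k < abc_data.length then
    let chunk := (abc_data.drop k).take 4
    let j1 := j + 1
    let piece := PySem.Str.join "" chunk
    let piece2 := if chunk.length == 4 then piece ++ (if j1 % 2 == 0 then "|" else " ") else piece
    loopB abc_data (pieces ++ [piece2]) j1 (k + 4)
  else pieces
termination_by abc_data.length - k

def add_barlines_py_alt (abc_data : List String) : String :=
  PySem.Str.join "" (loopB abc_data [] 0 0)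

-- ===== PRECONDITION & SPEC =====
def Spec_add_barlines_py (abc_data : List String) (out : String) : Prop := out = add_barlines_py_alt abc_data
instance (abc_data : List String) (out : String) : Decidable (Spec_add_barlines_py abc_data out) := by unfold Spec_add_barlines_py; infer_instance

-- ===== CLAIM (what is proved, stated in full; the proofs are below) =====
def Claim_equal_add_barlines_py : Prop := ∀ (abc_data : List String), Dom_add_barlines_py abc_data → Spec_add_barlines_py abc_data (add_barlines_py abc_data)

-- ===== LEMMAS AND PROOFS =====

-- separator A emits after processing the n-th token (1-based)
def pvSep (n : Nat) : String := if n % 8 == 0 then "|" else if n % 4 == 0 then " " else ""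

-- A's loop rephrased as structural recursion on the remaining tokens
def pvGoL : List String → Nat → String
  | [], _ => ""
  | x :: xs, i => x ++ (pvSep (i + 1) ++ pvGoL xs (i + 1))

-- B's chunk loop rephrased as structural recursion on the remaining tokens
def chunksB : List String → Nat → String
  | [], _ => ""
  | x :: xs, j =>
    let head := (x :: xs).take 4
    let rest := (x :: xs).drop 4
    let piece := PySem.Str.join "" head
    let piece2 := if head.length == 4 then piece ++ (if j % 2 == 0 then "|" else " ") else piece
    piece2 ++ chunksB rest (j + 1)
termination_by l => l.length
decreasing_by simp

theorem pvJoin_nil : PySem.Str.join "" ([] : List String) = "" := by decide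

theorem pvJoin_cons (p : String) (ps : List String) :
    PySem.Str.join "" (p :: ps) = p ++ PySem.Str.join "" ps := by
  simp [PySem.Str.join]
  apply String.toList_inj.mp
  simp [PySem.Chars.join, List.intercalate]
  induction ps <;> simp_all

theorem pvGoA_eq (n : Nat) : ∀ (abc : List String) (output : String) (i : Nat),
    abc.length - i = n → goA abc output i = output ++ pvGoL (abc.drop i) i := by
  induction n with
  | zero =>
    intro abc output i hn
    rw [goA]
    have h : ¬ i < abc.length := by omega
    simp [h, List.drop_eq_nil_of_le (by omega : abc.length ≤ i), pvGoL]
  | succ n ih =>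
    intro abc output i hn
    have h : i < abc.length := by omega
    rw [goA]
    simp only [h, dif_pos]
    rw [ih abc _ (i + 1) (by omega)]
    rw [List.drop_eq_getElem_cons h, pvGoL]
    simp only [pvSep]
    by_cases h8 : (i + 1) % 8 = 0
    · simp [h8, String.append_assoc]
    · by_cases h4 : (i + 1) % 4 = 0
      · simp [h8, h4, String.append_assoc]
      · simp [h8, h4, String.append_assoc]

theorem chunksB_nil (j : Nat) : chunksB [] j = "" := by rw [chunksB]

theorem chunksB_cons (x : String) (xs : List String) (j : Nat) :
    chunksB (x :: xs) j =
      (if ((x :: xs).take 4).length == 4 then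
        PySem.Str.join "" ((x :: xs).take 4) ++ (if j % 2 == 0 then "|" else " ")
      else PySem.Str.join "" ((x :: xs).take 4)) ++ chunksB ((x :: xs).drop 4) (j + 1) := by
  rw [chunksB]

theorem pvMain (n : Nat) : ∀ (l : List String) (j : Nat), l.length ≤ n →
    pvGoL l (4 * j) = chunksB l (j + 1) := by
  induction n with
  | zero =>
    intro l j hl
    have : l = [] := List.eq_nil_of_length_eq_zero (by omega)
    subst this
    simp [pvGoL, chunksB_nil]
  | succ n ih =>
    intro l j hl
    match l with
    | [] => simp [pvGoL, chunksB_nil]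
    | [a] =>
      have h1 : (4 * j + 1) % 8 ≠ 0 := by omega
      have h2 : (4 * j + 1) % 4 ≠ 0 := by omega
      simp [pvGoL, pvSep, chunksB_cons, chunksB_nil, pvJoin_cons, pvJoin_nil, h1]
    | [a, b] =>
      have h1 : (4 * j + 1) % 8 ≠ 0 := by omega
      have h2 : (4 * j + 1) % 4 ≠ 0 := by omega
      have h3 : (4 * j + 2) % 8 ≠ 0 := by omega
      have h4 : (4 * j + 2) % 4 ≠ 0 := by omega
      simp [pvGoL, pvSep, chunksB_cons, chunksB_nil, pvJoin_cons, pvJoin_nil, h1, h3, h4]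
    | [a, b, c] =>
      have h1 : (4 * j + 1) % 8 ≠ 0 := by omega
      have h2 : (4 * j + 1) % 4 ≠ 0 := by omega
      have h3 : (4 * j + 2) % 8 ≠ 0 := by omega
      have h4 : (4 * j + 2) % 4 ≠ 0 := by omega
      have h5 : (4 * j + 3) % 8 ≠ 0 := by omega
      have h6 : (4 * j + 3) % 4 ≠ 0 := by omega
      simp [pvGoL, pvSep, chunksB_cons, chunksB_nil, pvJoin_cons, pvJoin_nil, h1, h3, h4, h5, h6]
    | a :: b :: c :: d :: rest =>
      have h1 : (4 * j + 1) % 8 ≠ 0 := by omega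
      have h2 : (4 * j + 1) % 4 ≠ 0 := by omega
      have h3 : (4 * j + 2) % 8 ≠ 0 := by omega
      have h4 : (4 * j + 2) % 4 ≠ 0 := by omega
      have h5 : (4 * j + 3) % 8 ≠ 0 := by omega
      have h6 : (4 * j + 3) % 4 ≠ 0 := by omega
      have hrest : pvGoL rest (4 * (j + 1)) = chunksB rest (j + 2) := by
        have := ih rest (j + 1) (by simp at hl; omega)
        simpa using this
      have hshift : 4 * j + 3 + 1 = 4 * (j + 1) := by omega
      by_cases hp : (j + 1) % 2 = 0
      · have h7 : 4 * (j + 1) % 8 = 0 := by omega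
        simp [pvGoL, pvSep, chunksB_cons, pvJoin_cons, pvJoin_nil, h1, h3, h4, h5, h6, h7, hp, String.append_assoc, hshift, hrest]
      · have h7 : 4 * (j + 1) % 8 ≠ 0 := by omega
        have h8 : 4 * (j + 1) % 4 = 0 := by omega
        simp [pvGoL, pvSep, chunksB_cons, pvJoin_cons, pvJoin_nil, h1, h3, h4, h5, h6, h7, h8, hp, String.append_assoc, hshift, hrest]


theorem pvLoopB_acc (n : Nat) : ∀ (abc pieces : List String) (j k : Nat), abc.length - k = n →
    loopB abc pieces j k = pieces ++ loopB abc [] j k := by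
  induction n using Nat.strong_induction_on with
  | _ n ih =>
    intro abc pieces j k hn
    by_cases h : k < abc.length
    · conv_lhs => rw [loopB]
      conv_rhs => rw [loopB]
      simp only [h, if_pos]
      rw [ih (abc.length - (k + 4)) (by omega) abc _ (j + 1) (k + 4) rfl]
      simp only [List.append_assoc, List.singleton_append, List.nil_append]
      rw [← List.singleton_append]
      exact congrArg (fun t => pieces ++ t)
        (ih (abc.length - (k + 4)) (by omega) abc _ (j + 1) (k + 4) rfl).symm
    · conv_lhs => rw [loopB]
      conv_rhs => rw [loopB]
      simp [h]

theorem pvLoopB_join (n : Nat) : ∀ (abc : List String) (j k : Nat), abc.length - k = n →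
    PySem.Str.join "" (loopB abc [] j k) = chunksB (abc.drop k) (j + 1) := by
  induction n using Nat.strong_induction_on with
  | _ n ih =>
    intro abc j k hn
    by_cases h : k < abc.length
    · rw [loopB]
      simp only [h, if_pos]
      rw [pvLoopB_acc (abc.length - (k + 4)) abc _ _ (k + 4) rfl]
      cases hm : abc.drop k with
      | nil =>
        exfalso
        have : (abc.drop k).length = abc.length - k := List.length_drop ..
        rw [hm] at this
        simp at this
        omega
      | cons x xs =>
        simp only [List.nil_append, List.singleton_append]
        rw [pvJoin_cons,
          ih (abc.length - (k + 4)) (by omega) abc (j + 1) (k + 4) rfl,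
          chunksB_cons]
        have hdd : (abc.drop k).drop 4 = abc.drop (k + 4) := by
          rw [List.drop_drop]
        rw [hm] at hdd
        rw [hdd]
    · rw [loopB]
      have hnil : abc.drop k = [] := List.drop_eq_nil_of_le (by omega)
      simp [h, hnil, chunksB_nil, pvJoin_nil]

-- ===== VERDICT (by name: the statement is the Claim_ definition above) =====
theorem add_barlines_py_spec : Claim_equal_add_barlines_py := by
  intro abc _
  unfold Spec_add_barlines_py add_barlines_py add_barlines_py_alt
  rw [pvGoA_eq (abc.length) abc "" 0 (by omega),
    pvLoopB_join abc.length abc 0 0 (by omega)]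
  have := pvMain abc.length abc 0 (le_refl _)
  simpa using this
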